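-- pv_equiv track=rewrite | github.com/hamian84/WeatherAIBrief | scripts/verify_asos_outputs.py | _select_column
-- ===== SOURCE A (Python) =====
-- def _normalize_name(name: str) -> str:
--     return "".join(ch for ch in name.lower() if ch.isalnum())
--
-- def _select_column(headers: list[str], candidates: list[str]) -> tuple[str | None, list[str]]:
--     normalized_headers = {_normalize_name(h): h for h in headers}
--     matches: list[str] = []
--     for candidate in candidates:
--         key = _normalize_name(candidate)
--         if key in normalized_headers:
--             matches.append(normalized_headers[key])
--     if not matches:
--         return None, []
--     chosen = matches[0]
--     return chosen, matches
-- ===== SOURCE B (Python) =====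
-- def _normalize_name(name: str) -> str:
--     return "".join(ch for ch in name.lower() if ch.isalnum())
--
-- def _select_column(headers: list[str], candidates: list[str]) -> tuple[str | None, list[str]]:
--     # Inverted traversal: a single pass over the headers fills one slot per
--     # candidate; each slot is overwritten whenever a header matches its key,
--     # so it ends up holding the most recent matching header.
--     keys = [_normalize_name(c) for c in candidates]
--     slots: list[str | None] = [None] * len(candidates)
--     for h in headers:
--         nh = _normalize_name(h)
--         for i, k in enumerate(keys):
--             if k == nh:
--                 slots[i] = h
--     matches = [s for s in slots if s is not None]
--     if not matches:
--         return None, []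
--     return matches[0], matches
-- ===== Notes on version B (the rewrite author's own statement) =====
-- stated objective: alternative
-- what changed: Inverts the traversal: instead of building a normalized-header dict and looking each candidate up, B makes a single pass over the headers overwriting one slot per candidate key, then collects the filled slots.
import Mathlib
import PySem

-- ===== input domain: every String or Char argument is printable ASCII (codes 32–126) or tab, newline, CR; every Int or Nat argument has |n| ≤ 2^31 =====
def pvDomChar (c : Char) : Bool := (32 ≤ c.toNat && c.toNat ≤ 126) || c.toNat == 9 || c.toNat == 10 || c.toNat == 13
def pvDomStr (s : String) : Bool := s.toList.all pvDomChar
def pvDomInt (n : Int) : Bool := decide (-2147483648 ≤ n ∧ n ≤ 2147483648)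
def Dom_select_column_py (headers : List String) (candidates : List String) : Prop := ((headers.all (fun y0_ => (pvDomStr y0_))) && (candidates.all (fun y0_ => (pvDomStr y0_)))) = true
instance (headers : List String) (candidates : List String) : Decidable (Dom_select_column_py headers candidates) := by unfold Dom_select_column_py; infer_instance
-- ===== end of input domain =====

-- B inverts A's traversal: no normalized-header dict; a single pass over the headers
-- overwrites one slot per candidate key, then the filled slots are collected (alternative; not faster).


-- ===== PORT A =====
-- _normalize_name: "".join(ch for ch in name.lower() if ch.isalnum());
-- joining single characters with "" is exactly String.ofList of the filtered char list.
def normName (name : String) : String :=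
  String.ofList ((PySem.Str.lower name).toList.filter (fun ch => PySem.Chars.isalnum ch))

def select_column_py (headers : List String) (candidates : List String) : Option String × List String :=
  let normalized_headers : PySem.Dict String String :=
    headers.foldl (fun d h => d.insert (normName h) h) PySem.Dict.empty
  let matchesL : List String :=
    candidates.foldl (fun ms c =>
      let key := normName c
      if normalized_headers.contains key then
        ms ++ [normalized_headers.getD key ""]   -- key present, so getD = dict lookup
      else ms) []
  match matchesL with
  | [] => (none, [])
  | chosen :: _ => (some chosen, matchesL)

-- ===== PORT B =====
def select_column_py_alt (headers : List String) (candidates : List String) : Option String × List String :=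
  let keys : List String := candidates.map normName
  let slots : List (Option String) :=
    headers.foldl (fun slots h =>
      let nh := normName h
      List.zipWith (fun k s => if k == nh then some h else s) keys slots)
      (List.replicate candidates.length (none : Option String))
  let matchesL : List String := slots.filterMap id
  match matchesL with
  | [] => (none, [])
  | chosen :: _ => (some chosen, matchesL)

-- ===== PRECONDITION & SPEC =====
def Spec_select_column_py (headers : List String) (candidates : List String) (out : Option String × List String) : Prop := out = select_column_py_alt headers candidates
instance (headers : List String) (candidates : List String) (out : Option String × List String) : Decidable (Spec_select_column_py headers candidates out) := by unfold Spec_select_column_py; infer_instance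

-- ===== CLAIM (what is proved, stated in full; the proofs are below) =====
def Claim_equal_select_column_py : Prop := ∀ (headers : List String) (candidates : List String), Dom_select_column_py headers candidates → Spec_select_column_py headers candidates (select_column_py headers candidates)

-- ===== LEMMAS AND PROOFS =====

-- the last header (in list order) whose normalized name equals k
def lastM (l : List String) (k : String) : Option String :=
  l.foldl (fun acc h => if k == normName h then some h else acc) none

-- A side: the dict lookup is the last match
theorem get?_foldl_insert_norm (l : List String) (d : PySem.Dict String String) (k : String) :
    (l.foldl (fun d h => d.insert (normName h) h) d).get? k
      = l.foldl (fun acc h => if k == normName h then some h else acc) (d.get? k) := by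
  induction l generalizing d with
  | nil => rfl
  | cons h t ih =>
      rw [List.foldl_cons, List.foldl_cons, ih, PySem.Dict.get?_insert]
      by_cases hk : k = normName h <;> simp [hk]

theorem get?_dict_eq_lastM (headers : List String) (k : String) :
    (headers.foldl (fun d h => d.insert (normName h) h) PySem.Dict.empty).get? k = lastM headers k := by
  rw [get?_foldl_insert_norm, lastM, PySem.Dict.get?_empty]

-- accumulating fold with optional append = filterMap
theorem foldl_opt_append {α : Type} (g : α → Option String) (l : List α) (acc : List String) :
    l.foldl (fun ms c => match g c with | some v => ms ++ [v] | none => ms) acc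
      = acc ++ l.filterMap g := by
  induction l generalizing acc with
  | nil => simp
  | cons c t ih =>
      rw [List.foldl_cons, List.filterMap_cons]
      cases hg : g c <;> simp [ih]

-- pointwise update of a map over the same index list
theorem zipWith_map_self {α β γ : Type} (f : α → β → γ) (g : α → β) (l : List α) :
    List.zipWith f l (l.map g) = l.map (fun a => f a (g a)) := by
  induction l with
  | nil => rfl
  | cons a t ih => simp [ih]

-- B side: the slot fold computes, per key, the last match
theorem slots_foldl_eq_map (keys : List String) (l : List String) (g0 : String → Option String) :
    l.foldl (fun slots h =>
        List.zipWith (fun k s => if k == normName h then some h else s) keys slots)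
      (keys.map g0)
      = keys.map (fun k => l.foldl (fun acc h => if k == normName h then some h else acc) (g0 k)) := by
  induction l generalizing g0 with
  | nil => rfl
  | cons h t ih =>
      rw [List.foldl_cons, zipWith_map_self, ih]
      simp

-- ===== VERDICT (by name: the statement is the Claim_ definition above) =====
theorem select_column_py_spec : Claim_equal_select_column_py := by
  intro headers candidates _
  unfold Spec_select_column_py select_column_py select_column_py_alt
  have hrep : List.replicate candidates.length (none : Option String)
      = (candidates.map normName).map (fun _ => none) := by
    simp [Function.comp_def]
  have hB : ((headers.foldl (fun slots h =>
        List.zipWith (fun k s => if k == normName h then some h else s) (candidates.map normName) slots)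
      (List.replicate candidates.length (none : Option String))).filterMap id)
      = candidates.foldl (fun ms c => match lastM headers (normName c) with
          | some v => ms ++ [v] | none => ms) [] := by
    rw [hrep, slots_foldl_eq_map, List.filterMap_map, foldl_opt_append]
    simp [Function.comp, lastM, List.filterMap_map]
  have hA : (candidates.foldl (fun ms c =>
      let key := normName c
      if (headers.foldl (fun d h => d.insert (normName h) h) PySem.Dict.empty).contains key then
        ms ++ [(headers.foldl (fun d h => d.insert (normName h) h) PySem.Dict.empty).getD key ""]
      else ms) [])
      = candidates.foldl (fun ms c => match lastM headers (normName c) with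
          | some v => ms ++ [v] | none => ms) [] := by
    apply List.foldl_ext
    intro ms c _
    simp only [PySem.Dict.contains_eq_isSome_get?, PySem.Dict.getD_eq_get?_getD, get?_dict_eq_lastM]
    cases lastM headers (normName c) <;> simp
  simp only [hA, hB]
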